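-- pv_equiv track=rewrite | github.com/santhosh2005-santhosh2005/placement-tutox | aitutor/aitutor/AI-Tutor/aiFeatures/python/ai_response.py | generate_quick_response
-- ===== SOURCE A (Python) =====
-- def generate_quick_response(query: str) -> str:
--     """Generate a quick response when the main AI system is taking too long"""
--     query_lower = query.lower()
--
--     # Educational topic responses
--     if any(word in query_lower for word in ['python', 'programming', 'code', 'coding']):
--         return "<p><strong>Python Programming:</strong> Python is a versatile, high-level programming language known for its simple syntax and powerful libraries. It's widely used in web development, data science, AI, and automation. Key concepts include variables, functions, loops, and object-oriented programming.</p>"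
--
--     elif any(word in query_lower for word in ['machine learning', 'ml', 'ai', 'artificial intelligence']):
--         return "<p><strong>Machine Learning:</strong> Machine Learning is a subset of AI that enables computers to learn from data without explicit programming. It includes supervised learning (classification, regression), unsupervised learning (clustering), and reinforcement learning. Popular algorithms include linear regression, decision trees, and neural networks.</p>"
--
--     elif any(word in query_lower for word in ['math', 'mathematics', 'algebra', 'calculus']):
--         return "<p><strong>Mathematics:</strong> Mathematics is the study of numbers, shapes, patterns, and relationships. It includes areas like arithmetic, algebra, geometry, calculus, and statistics. Math is fundamental to science, engineering, and many other fields.</p>"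
--
--     elif any(word in query_lower for word in ['dsa', 'data structures', 'algorithms']):
--         return "<p><strong>Data Structures and Algorithms:</strong> DSA involves organizing data efficiently (arrays, linked lists, trees, graphs) and designing step-by-step procedures to solve problems. Common algorithms include sorting (quicksort, mergesort), searching (binary search), and graph traversal (BFS, DFS).</p>"
--
--     elif any(word in query_lower for word in ['database', 'sql', 'mysql', 'postgresql']):
--         return "<p><strong>Databases:</strong> Databases store and organize data systematically. SQL (Structured Query Language) is used to interact with relational databases. Key concepts include tables, primary keys, foreign keys, joins, and normalization.</p>"
--
--     elif any(word in query_lower for word in ['web development', 'html', 'css', 'javascript', 'frontend', 'backend']):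
--         return "<p><strong>Web Development:</strong> Web development involves creating websites and web applications. Frontend uses HTML (structure), CSS (styling), and JavaScript (interactivity). Backend handles server logic, databases, and APIs using languages like Python, Java, or Node.js.</p>"
--
--     else:
--         return f"<p>Thank you for asking about <strong>{query}</strong>. This is an interesting topic that involves multiple concepts and applications. For a more detailed explanation, please try asking a more specific question about particular aspects you'd like to understand better.</p>"
-- ===== SOURCE B (Python) =====
-- # Different strategy: a flat (keyword, priority) table; one pass computes the
-- # MINIMUM priority among all matching keywords, then that index selects the
-- # response.  Correct because A returns the response of the lowest-numbered
-- # branch whose keyword set has a match, which is exactly the minimum priority.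
-- RESPONSES = [
--     "<p><strong>Python Programming:</strong> Python is a versatile, high-level programming language known for its simple syntax and powerful libraries. It's widely used in web development, data science, AI, and automation. Key concepts include variables, functions, loops, and object-oriented programming.</p>",
--     "<p><strong>Machine Learning:</strong> Machine Learning is a subset of AI that enables computers to learn from data without explicit programming. It includes supervised learning (classification, regression), unsupervised learning (clustering), and reinforcement learning. Popular algorithms include linear regression, decision trees, and neural networks.</p>",
--     "<p><strong>Mathematics:</strong> Mathematics is the study of numbers, shapes, patterns, and relationships. It includes areas like arithmetic, algebra, geometry, calculus, and statistics. Math is fundamental to science, engineering, and many other fields.</p>",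
--     "<p><strong>Data Structures and Algorithms:</strong> DSA involves organizing data efficiently (arrays, linked lists, trees, graphs) and designing step-by-step procedures to solve problems. Common algorithms include sorting (quicksort, mergesort), searching (binary search), and graph traversal (BFS, DFS).</p>",
--     "<p><strong>Databases:</strong> Databases store and organize data systematically. SQL (Structured Query Language) is used to interact with relational databases. Key concepts include tables, primary keys, foreign keys, joins, and normalization.</p>",
--     "<p><strong>Web Development:</strong> Web development involves creating websites and web applications. Frontend uses HTML (structure), CSS (styling), and JavaScript (interactivity). Backend handles server logic, databases, and APIs using languages like Python, Java, or Node.js.</p>",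
-- ]
--
-- KEYWORDS = [
--     ("python", 0), ("programming", 0), ("code", 0), ("coding", 0),
--     ("machine learning", 1), ("ml", 1), ("ai", 1), ("artificial intelligence", 1),
--     ("math", 2), ("mathematics", 2), ("algebra", 2), ("calculus", 2),
--     ("dsa", 3), ("data structures", 3), ("algorithms", 3),
--     ("database", 4), ("sql", 4), ("mysql", 4), ("postgresql", 4),
--     ("web development", 5), ("html", 5), ("css", 5), ("javascript", 5),
--     ("frontend", 5), ("backend", 5),
-- ]
--
--
-- def generate_quick_response(query: str) -> str:
--     query_lower = query.lower()
--     best = None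
--     for word, prio in KEYWORDS:
--         if word in query_lower:
--             best = prio if best is None else min(best, prio)
--     if best is None:
--         return f"<p>Thank you for asking about <strong>{query}</strong>. This is an interesting topic that involves multiple concepts and applications. For a more detailed explanation, please try asking a more specific question about particular aspects you'd like to understand better.</p>"
--     return RESPONSES[best]
-- ===== Notes on version B (the rewrite author's own statement) =====
-- stated objective: alternative
-- what changed: The if/elif chain of per-topic any() checks is replaced by a single full pass over a flat (keyword, priority) table accumulating the minimum matching priority, which then indexes a responses list; no early return and no per-rule grouping.
import Mathlib
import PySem

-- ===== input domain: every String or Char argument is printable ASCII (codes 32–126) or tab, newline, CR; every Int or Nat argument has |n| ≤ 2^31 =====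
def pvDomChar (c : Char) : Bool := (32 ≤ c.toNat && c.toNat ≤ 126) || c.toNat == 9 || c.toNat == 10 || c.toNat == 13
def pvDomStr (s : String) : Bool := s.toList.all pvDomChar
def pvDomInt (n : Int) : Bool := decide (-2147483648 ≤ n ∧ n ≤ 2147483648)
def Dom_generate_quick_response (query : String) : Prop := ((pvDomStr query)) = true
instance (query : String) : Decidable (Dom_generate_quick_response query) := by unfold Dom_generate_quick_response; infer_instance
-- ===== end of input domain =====

-- B replaces A's if/elif chain by one pass over a flat (keyword, priority) table that
-- accumulates the minimum matching priority and indexes a responses list (objective: alternative).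

-- canned-response string constants (pure data)
def resp_py : String := "<p><strong>Python Programming:</strong> Python is a versatile, high-level programming language known for its simple syntax and powerful libraries. It's widely used in web development, data science, AI, and automation. Key concepts include variables, functions, loops, and object-oriented programming.</p>"
def resp_ml : String := "<p><strong>Machine Learning:</strong> Machine Learning is a subset of AI that enables computers to learn from data without explicit programming. It includes supervised learning (classification, regression), unsupervised learning (clustering), and reinforcement learning. Popular algorithms include linear regression, decision trees, and neural networks.</p>"
def resp_math : String := "<p><strong>Mathematics:</strong> Mathematics is the study of numbers, shapes, patterns, and relationships. It includes areas like arithmetic, algebra, geometry, calculus, and statistics. Math is fundamental to science, engineering, and many other fields.</p>"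
def resp_dsa : String := "<p><strong>Data Structures and Algorithms:</strong> DSA involves organizing data efficiently (arrays, linked lists, trees, graphs) and designing step-by-step procedures to solve problems. Common algorithms include sorting (quicksort, mergesort), searching (binary search), and graph traversal (BFS, DFS).</p>"
def resp_db : String := "<p><strong>Databases:</strong> Databases store and organize data systematically. SQL (Structured Query Language) is used to interact with relational databases. Key concepts include tables, primary keys, foreign keys, joins, and normalization.</p>"
def resp_web : String := "<p><strong>Web Development:</strong> Web development involves creating websites and web applications. Frontend uses HTML (structure), CSS (styling), and JavaScript (interactivity). Backend handles server logic, databases, and APIs using languages like Python, Java, or Node.js.</p>"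
def resp_default (query : String) : String := "<p>Thank you for asking about <strong>" ++ query ++ "</strong>. This is an interesting topic that involves multiple concepts and applications. For a more detailed explanation, please try asking a more specific question about particular aspects you'd like to understand better.</p>"

-- ===== PORT A =====
def generate_quick_response (query : String) : String :=
  let query_lower := PySem.Str.lower query
  if ["python", "programming", "code", "coding"].any (fun word => PySem.Str.isIn word query_lower) then
    resp_py
  else if ["machine learning", "ml", "ai", "artificial intelligence"].any (fun word => PySem.Str.isIn word query_lower) then
    resp_ml
  else if ["math", "mathematics", "algebra", "calculus"].any (fun word => PySem.Str.isIn word query_lower) then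
    resp_math
  else if ["dsa", "data structures", "algorithms"].any (fun word => PySem.Str.isIn word query_lower) then
    resp_dsa
  else if ["database", "sql", "mysql", "postgresql"].any (fun word => PySem.Str.isIn word query_lower) then
    resp_db
  else if ["web development", "html", "css", "javascript", "frontend", "backend"].any (fun word => PySem.Str.isIn word query_lower) then
    resp_web
  else
    resp_default query

-- ===== PORT B =====
def pvResponses : List String := [resp_py, resp_ml, resp_math, resp_dsa, resp_db, resp_web]

def pvKeywords : List (String × Nat) :=
  [ ("python", 0), ("programming", 0), ("code", 0), ("coding", 0)
  , ("machine learning", 1), ("ml", 1), ("ai", 1), ("artificial intelligence", 1)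
  , ("math", 2), ("mathematics", 2), ("algebra", 2), ("calculus", 2)
  , ("dsa", 3), ("data structures", 3), ("algorithms", 3)
  , ("database", 4), ("sql", 4), ("mysql", 4), ("postgresql", 4)
  , ("web development", 5), ("html", 5), ("css", 5), ("javascript", 5)
  , ("frontend", 5), ("backend", 5) ]

-- the loop body: update the running minimum priority on a keyword match
def pvStep (q : String) (best : Option Nat) (p : String × Nat) : Option Nat :=
  if PySem.Str.isIn p.1 q then
    match best with
    | none => some p.2
    | some b => some (min b p.2)
  else best

def generate_quick_response_alt (query : String) : String :=
  let query_lower := PySem.Str.lower query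
  let best := pvKeywords.foldl (pvStep query_lower) none
  match best with
  | none => resp_default query
  | some i => pvResponses.getD i ""

-- ===== PRECONDITION & SPEC =====
def Spec_generate_quick_response (query : String) (out : String) : Prop := out = generate_quick_response_alt query
instance (query : String) (out : String) : Decidable (Spec_generate_quick_response query out) := by unfold Spec_generate_quick_response; infer_instance

-- ===== CLAIM (what is proved, stated in full; the proofs are below) =====
def Claim_equal_generate_quick_response : Prop := ∀ (query : String), Dom_generate_quick_response query → Spec_generate_quick_response query (generate_quick_response query)

-- ===== LEMMAS AND PROOFS =====

-- a running minimum i folds unchanged through a group of priority j ≥ i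
theorem pvStep_fold_min_map (q : String) (i j : Nat) (hij : i ≤ j) (l : List String) :
    (l.map (fun w => (w, j))).foldl (pvStep q) (some i) = some i := by
  induction l with
  | nil => rfl
  | cons w tl ih =>
      simp only [List.map_cons, List.foldl_cons]
      have hstep : pvStep q (some i) (w, j) = some i := by
        unfold pvStep
        by_cases hc : PySem.Str.isIn w q = true
        · rw [if_pos hc]
          show some (min i j) = some i
          rw [Nat.min_eq_left hij]
        · rw [if_neg hc]
      rw [hstep]
      exact ih

-- folding a same-priority group from 'none' yields 'some i' iff some keyword matches
theorem pvStep_fold_group (q : String) (i : Nat) (l : List String) :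
    (l.map (fun w => (w, i))).foldl (pvStep q) none =
      (if l.any (fun w => PySem.Str.isIn w q) then some i else none) := by
  induction l with
  | nil => rfl
  | cons w tl ih =>
      simp only [List.map_cons, List.foldl_cons, List.any_cons]
      by_cases hc : PySem.Str.isIn w q = true
      · rw [show pvStep q none (w, i) = some i by unfold pvStep; rw [if_pos hc],
          pvStep_fold_min_map q i i (le_refl i) tl]
        simp only [hc, Bool.true_or]
        rfl
      · rw [Bool.not_eq_true] at hc
        rw [show pvStep q none (w, i) = none by
              unfold pvStep; rw [if_neg (by simp only [hc]; decide)],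
          ih]
        simp only [hc, Bool.false_or]

-- the flat table is the concatenation of the six per-topic groups
theorem pvKeywords_eq :
    pvKeywords =
      (["python", "programming", "code", "coding"].map (fun w => (w, 0))) ++
      (["machine learning", "ml", "ai", "artificial intelligence"].map (fun w => (w, 1))) ++
      (["math", "mathematics", "algebra", "calculus"].map (fun w => (w, 2))) ++
      (["dsa", "data structures", "algorithms"].map (fun w => (w, 3))) ++
      (["database", "sql", "mysql", "postgresql"].map (fun w => (w, 4))) ++
      (["web development", "html", "css", "javascript", "frontend", "backend"].map (fun w => (w, 5))) := rfl

-- ===== VERDICT (by name: the statement is the Claim_ definition above) =====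
theorem generate_quick_response_spec : Claim_equal_generate_quick_response := by
  intro query _
  unfold Spec_generate_quick_response generate_quick_response generate_quick_response_alt
  set q := PySem.Str.lower query with hq
  rw [pvKeywords_eq]
  simp only [List.foldl_append]
  by_cases h0 : ["python", "programming", "code", "coding"].any (fun word => PySem.Str.isIn word q) = true
  · simp only [pvStep_fold_group, if_pos h0]
    rw [pvStep_fold_min_map, pvStep_fold_min_map, pvStep_fold_min_map,
      pvStep_fold_min_map, pvStep_fold_min_map]
    all_goals first | rfl | decide
  · simp only [pvStep_fold_group, if_neg h0]
    by_cases h1 : ["machine learning", "ml", "ai", "artificial intelligence"].any (fun word => PySem.Str.isIn word q) = true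
    · simp only [if_pos h1]
      rw [pvStep_fold_min_map, pvStep_fold_min_map, pvStep_fold_min_map, pvStep_fold_min_map]
      all_goals first | rfl | decide
    · simp only [pvStep_fold_group, if_neg h1]
      by_cases h2 : ["math", "mathematics", "algebra", "calculus"].any (fun word => PySem.Str.isIn word q) = true
      · simp only [if_pos h2]
        rw [pvStep_fold_min_map, pvStep_fold_min_map, pvStep_fold_min_map]
        all_goals first | rfl | decide
      · simp only [pvStep_fold_group, if_neg h2]
        by_cases h3 : ["dsa", "data structures", "algorithms"].any (fun word => PySem.Str.isIn word q) = true
        · simp only [if_pos h3]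
          rw [pvStep_fold_min_map, pvStep_fold_min_map]
          all_goals first | rfl | decide
        · simp only [pvStep_fold_group, if_neg h3]
          by_cases h4 : ["database", "sql", "mysql", "postgresql"].any (fun word => PySem.Str.isIn word q) = true
          · simp only [if_pos h4]
            rw [pvStep_fold_min_map]
            all_goals first | rfl | decide
          · simp only [pvStep_fold_group, if_neg h4]
            by_cases h5 : ["web development", "html", "css", "javascript", "frontend", "backend"].any (fun word => PySem.Str.isIn word q) = true
            · simp only [if_pos h5]
              rfl
            · simp only [if_neg h5]
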